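-- pv_equiv track=rewrite | github.com/edwinly917/DeepTutor | src/services/export/mindmap_generator.py | generate_mindmap_code
-- ===== SOURCE A (Python) =====
-- def extract_structure_from_markdown(markdown: str) -> dict:
--     """Extract hierarchical structure from markdown headings."""
--     lines = markdown.split('\n')
--     result = {'title': 'Research Report', 'sections': []}
--     current_h1 = None
--
--     for line in lines:
--         line = line.strip()
--         if line.startswith('# '):
--             title = line[2:].strip()
--             if not current_h1:
--                 result['title'] = title
--             else:
--                 result['sections'].append({'name': title, 'children': []})
--             current_h1 = title
--         elif line.startswith('## '):
--             result['sections'].append({'name': line[3:].strip(), 'children': []})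
--         elif line.startswith('### '):
--             if result['sections']:
--                 result['sections'][-1]['children'].append({
--                     'name': line[4:].strip(), 'children': []
--                 })
--         elif line.startswith('#### '):
--             if result['sections'] and result['sections'][-1]['children']:
--                 result['sections'][-1]['children'][-1]['children'].append(line[5:].strip())
--
--     return result
--
-- def escape_mermaid_text(text: str) -> str:
--     """Escape special characters for Mermaid mindmap."""
--     for old, new in [('(', '（'), (')', '）'), ('[', '【'), (']', '】'),
--                      ('{', '｛'), ('}', '｝'), ('<', '＜'), ('>', '＞'), ('\n', ' ')]:
--         text = text.replace(old, new)
--     if len(text) > 30: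
--         text = text[:27] + '...'
--     return text.strip()
--
-- def generate_mindmap_code(markdown: str) -> str:
--     """Generate Mermaid mindmap code from markdown content."""
--     structure = extract_structure_from_markdown(markdown)
--     lines = ['mindmap']
--     title = escape_mermaid_text(structure['title'])
--     lines.append('  root((' + title + '))')
--
--     for section in structure['sections'][:7]:
--         lines.append('    ' + escape_mermaid_text(section['name']))
--         for subsection in section.get('children', [])[:5]:
--             if isinstance(subsection, dict):
--                 lines.append('      ' + escape_mermaid_text(subsection['name']))
--                 for point in subsection.get('children', [])[:3]:
--                     if isinstance(point, str):
--                         lines.append('        ' + escape_mermaid_text(point))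
--
--     return '\n'.join(lines)
-- ===== SOURCE B (Python) =====
-- def escape_mermaid_text(text: str) -> str:
--     """Escape special characters for Mermaid mindmap."""
--     for old, new in [('(', '（'), (')', '）'), ('[', '【'), (']', '】'),
--                      ('{', '｛'), ('}', '｝'), ('<', '＜'), ('>', '＞'), ('\n', ' ')]:
--         text = text.replace(old, new)
--     if len(text) > 30:
--         text = text[:27] + '...'
--     return text.strip()
--
-- def generate_mindmap_code(markdown: str) -> str:
--     """Generate Mermaid mindmap code from markdown content, in one streaming
--     pass over the lines: no intermediate tree is built.  While scanning we keep
--     the number of sections seen (emit the first 7), the current section's child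
--     count (emit the first 5) and the current child's point count (emit the
--     first 3), appending each escaped, indented Mermaid line immediately."""
--     title = 'Research Report'
--     current_h1 = None           # last H1 text, as in the markdown
--     body = []
--     nsec = 0                    # sections started so far
--     nchild = -1                 # children of the current section (-1: no section yet)
--     npoint = -1                 # points of the current child (-1: no child yet)
--     for raw in markdown.split('\n'):
--         line = raw.strip()
--         if line.startswith('# '):
--             t = line[2:].strip()
--             if not current_h1:
--                 title = t
--             else:
--                 nsec += 1
--                 nchild, npoint = 0, -1
--                 if nsec <= 7:
--                     body.append('    ' + escape_mermaid_text(t))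
--             current_h1 = t
--         elif line.startswith('## '):
--             nsec += 1
--             nchild, npoint = 0, -1
--             if nsec <= 7:
--                 body.append('    ' + escape_mermaid_text(line[3:].strip()))
--         elif line.startswith('### '):
--             if nchild >= 0:
--                 nchild += 1
--                 npoint = 0
--                 if nsec <= 7 and nchild <= 5:
--                     body.append('      ' + escape_mermaid_text(line[4:].strip()))
--         elif line.startswith('#### '):
--             if npoint >= 0:
--                 npoint += 1
--                 if nsec <= 7 and nchild <= 5 and npoint <= 3:
--                     body.append('        ' + escape_mermaid_text(line[5:].strip()))
--     return '\n'.join(['mindmap', '  root((' + escape_mermaid_text(title) + '))'] + body)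
-- ===== Notes on version B (the rewrite author's own statement) =====
-- stated objective: alternative
-- what changed: B fuses A's two phases (build a nested title/sections/children/points tree, then format it with per-level caps) into a single streaming pass over the lines that keeps only three counters (sections, children of the current section, points of the current child) and emits each escaped Mermaid line immediately, never building the intermediate tree.
import Mathlib
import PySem

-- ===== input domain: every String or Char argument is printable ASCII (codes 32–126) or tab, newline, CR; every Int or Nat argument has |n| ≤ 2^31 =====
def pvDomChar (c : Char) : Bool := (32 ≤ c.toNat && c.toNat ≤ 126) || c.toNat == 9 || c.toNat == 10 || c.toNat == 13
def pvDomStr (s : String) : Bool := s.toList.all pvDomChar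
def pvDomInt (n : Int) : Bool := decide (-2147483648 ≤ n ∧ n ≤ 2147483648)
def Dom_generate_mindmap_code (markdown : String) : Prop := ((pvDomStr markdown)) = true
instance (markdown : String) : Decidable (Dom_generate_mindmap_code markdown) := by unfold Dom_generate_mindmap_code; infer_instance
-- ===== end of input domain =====

-- B fuses A's parse-then-format into one streaming pass with per-level counters
-- (no intermediate tree); same output, similar cost (objective: alternative).

-- shared helper: escape_mermaid_text (identical in Source A and Source B), on code points
def pvEscChars (text : List Char) : List Char :=
  let t := PySem.Chars.replace text ['('] ['（']
  let t := PySem.Chars.replace t [')'] ['）']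
  let t := PySem.Chars.replace t ['['] ['【']
  let t := PySem.Chars.replace t [']'] ['】']
  let t := PySem.Chars.replace t ['{'] ['｛']
  let t := PySem.Chars.replace t ['}'] ['｝']
  let t := PySem.Chars.replace t ['<'] ['＜']
  let t := PySem.Chars.replace t ['>'] ['＞']
  let t := PySem.Chars.replace t ['\n'] [' ']
  let t := if 30 < PySem.Chars.len t then PySem.Chars.slice t none (some 27) ++ "...".toList else t
  PySem.Chars.strip t

-- Python truthiness of the tracked `current_h1` variable (None or '' is falsy)
def pvFalsy (cur : Option (List Char)) : Bool :=
  match cur with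
  | none => true
  | some c => c.isEmpty

-- ===== PORT A =====
-- a subsection: (name, points);  a section: (name, children)
abbrev PvSub := List Char × List (List Char)
abbrev PvSec := List Char × List PvSub

-- one iteration of the parse loop of extract_structure_from_markdown;
-- state: ((result.title, result.sections), current_h1)
def pvALine (st : (List Char × List PvSec) × Option (List Char)) (raw : List Char) :
    (List Char × List PvSec) × Option (List Char) :=
  let line := PySem.Chars.strip raw
  let res := st.1
  let cur := st.2
  if PySem.Chars.startswith line "# ".toList then
    let title := PySem.Chars.strip (PySem.Chars.slice line (some 2) none)
    let res :=
      if pvFalsy cur then (title, res.2)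
      else (res.1, res.2 ++ [(title, [])])
    (res, some title)
  else if PySem.Chars.startswith line "## ".toList then
    ((res.1, res.2 ++ [(PySem.Chars.strip (PySem.Chars.slice line (some 3) none), [])]), cur)
  else if PySem.Chars.startswith line "### ".toList then
    -- `if result['sections']:` then append to sections[-1]['children']
    (match res.2.getLast? with
     | none => (res, cur)
     | some lastSec =>
        ((res.1, res.2.dropLast ++
          [(lastSec.1, lastSec.2 ++ [(PySem.Chars.strip (PySem.Chars.slice line (some 4) none), [])])]), cur))
  else if PySem.Chars.startswith line "#### ".toList then
    -- `if result['sections'] and result['sections'][-1]['children']:`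
    (match res.2.getLast? with
     | none => (res, cur)
     | some lastSec =>
       match lastSec.2.getLast? with
       | none => (res, cur)
       | some lastSub =>
         ((res.1, res.2.dropLast ++
           [(lastSec.1, lastSec.2.dropLast ++
             [(lastSub.1, lastSub.2 ++ [PySem.Chars.strip (PySem.Chars.slice line (some 5) none)])])]), cur))
  else (res, cur)

def pvExtract (markdown : List Char) : List Char × List PvSec :=
  ((PySem.Chars.splitOn markdown ['\n']).foldl pvALine (("Research Report".toList, []), none)).1

def generate_mindmap_code (markdown : String) : String :=
  let strct := pvExtract markdown.toList
  let lines : List (List Char) := ["mindmap".toList]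
  let title := pvEscChars strct.1
  let lines := lines ++ ["  root((".toList ++ title ++ "))".toList]
  let lines := (PySem.List.slice strct.2 none (some 7)).foldl (fun ls sec =>
      let ls := ls ++ ["    ".toList ++ pvEscChars sec.1]
      (PySem.List.slice sec.2 none (some 5)).foldl (fun ls2 sub =>
          let ls2 := ls2 ++ ["      ".toList ++ pvEscChars sub.1]
          (PySem.List.slice sub.2 none (some 3)).foldl
            (fun ls3 pt => ls3 ++ ["        ".toList ++ pvEscChars pt]) ls2) ls) lines
  String.ofList (PySem.Chars.join ['\n'] lines)

-- ===== PORT B =====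
-- streaming state: (title, current_h1, body, nsec, nchild, npoint)
abbrev PvBState := List Char × Option (List Char) × List (List Char) × Int × Int × Int

def pvBLine (st : PvBState) (raw : List Char) : PvBState :=
  let line := PySem.Chars.strip raw
  if PySem.Chars.startswith line "# ".toList then
    let t := PySem.Chars.strip (PySem.Chars.slice line (some 2) none)
    if pvFalsy st.2.1 then
      (t, some t, st.2.2)
    else
      let nsec := st.2.2.2.1 + 1
      (st.1, some t,
       (if nsec ≤ 7 then st.2.2.1 ++ ["    ".toList ++ pvEscChars t] else st.2.2.1),
       nsec, 0, -1)
  else if PySem.Chars.startswith line "## ".toList then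
    let nsec := st.2.2.2.1 + 1
    (st.1, st.2.1,
     (if nsec ≤ 7 then
        st.2.2.1 ++ ["    ".toList ++ pvEscChars (PySem.Chars.strip (PySem.Chars.slice line (some 3) none))]
      else st.2.2.1),
     nsec, 0, -1)
  else if PySem.Chars.startswith line "### ".toList then
    if 0 ≤ st.2.2.2.2.1 then
      let nchild := st.2.2.2.2.1 + 1
      (st.1, st.2.1,
       (if st.2.2.2.1 ≤ 7 ∧ nchild ≤ 5 then
          st.2.2.1 ++ ["      ".toList ++ pvEscChars (PySem.Chars.strip (PySem.Chars.slice line (some 4) none))]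
        else st.2.2.1),
       st.2.2.2.1, nchild, 0)
    else st
  else if PySem.Chars.startswith line "#### ".toList then
    if 0 ≤ st.2.2.2.2.2 then
      let npoint := st.2.2.2.2.2 + 1
      (st.1, st.2.1,
       (if st.2.2.2.1 ≤ 7 ∧ st.2.2.2.2.1 ≤ 5 ∧ npoint ≤ 3 then
          st.2.2.1 ++ ["        ".toList ++ pvEscChars (PySem.Chars.strip (PySem.Chars.slice line (some 5) none))]
        else st.2.2.1),
       st.2.2.2.1, st.2.2.2.2.1, npoint)
    else st
  else st

def generate_mindmap_code_alt (markdown : String) : String :=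
  let st := (PySem.Chars.splitOn markdown.toList ['\n']).foldl pvBLine
              ("Research Report".toList, none, [], 0, -1, -1)
  String.ofList (PySem.Chars.join ['\n']
    ("mindmap".toList :: ("  root((".toList ++ pvEscChars st.1 ++ "))".toList) :: st.2.2.1))

-- ===== PRECONDITION & SPEC =====
def Spec_generate_mindmap_code (markdown : String) (out : String) : Prop := out = generate_mindmap_code_alt markdown
instance (markdown : String) (out : String) : Decidable (Spec_generate_mindmap_code markdown out) := by unfold Spec_generate_mindmap_code; infer_instance

-- ===== CLAIM (what is proved, stated in full; the proofs are below) =====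
def Claim_equal_generate_mindmap_code : Prop := ∀ (markdown : String), Dom_generate_mindmap_code markdown → Spec_generate_mindmap_code markdown (generate_mindmap_code markdown)

-- ===== LEMMAS AND PROOFS =====

-- B's counters as functions of A's section tree
def pvChildC (secs : List PvSec) : Int :=
  match secs.getLast? with
  | none => -1
  | some sec => sec.2.length

def pvPointC (secs : List PvSec) : Int :=
  match secs.getLast? with
  | none => -1
  | some sec =>
    match sec.2.getLast? with
    | none => -1
    | some sub => sub.2.length

-- the Mermaid lines A's formatting loop emits for one subsection / section / all sections
def pvRenderSub (sub : PvSub) : List (List Char) :=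
  ("      ".toList ++ pvEscChars sub.1) :: (sub.2.take 3).map (fun pt => "        ".toList ++ pvEscChars pt)

def pvRenderSec (sec : PvSec) : List (List Char) :=
  ("    ".toList ++ pvEscChars sec.1) :: (sec.2.take 5).flatMap pvRenderSub

def pvRenderBody (secs : List PvSec) : List (List Char) := (secs.take 7).flatMap pvRenderSec

lemma pvAFormat (secs : List PvSec) (ls0 : List (List Char)) :
    (PySem.List.slice secs none (some 7)).foldl (fun ls sec =>
      let ls := ls ++ ["    ".toList ++ pvEscChars sec.1]
      (PySem.List.slice sec.2 none (some 5)).foldl (fun ls2 sub =>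
          let ls2 := ls2 ++ ["      ".toList ++ pvEscChars sub.1]
          (PySem.List.slice sub.2 none (some 3)).foldl
            (fun ls3 pt => ls3 ++ ["        ".toList ++ pvEscChars pt]) ls2) ls) ls0
    = ls0 ++ pvRenderBody secs := by
  have h3 : ∀ (pts : List (List Char)) (acc : List (List Char)),
      (PySem.List.slice pts none (some 3)).foldl
        (fun ls3 pt => ls3 ++ ["        ".toList ++ pvEscChars pt]) acc
      = acc ++ (pts.take 3).map (fun pt => "        ".toList ++ pvEscChars pt) := by
    intro pts acc
    rw [PySem.List.slice_to pts (by norm_num), PySem.List.foldl_append_singleton_eq_map]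
    rfl
  have h2 : ∀ (subs : List PvSub) (acc : List (List Char)),
      (PySem.List.slice subs none (some 5)).foldl (fun ls2 sub =>
          let ls2 := ls2 ++ ["      ".toList ++ pvEscChars sub.1]
          (PySem.List.slice sub.2 none (some 3)).foldl
            (fun ls3 pt => ls3 ++ ["        ".toList ++ pvEscChars pt]) ls2) acc
      = acc ++ (subs.take 5).flatMap pvRenderSub := by
    intro subs acc
    rw [PySem.List.slice_to subs (by norm_num)]
    have : (fun (ls2 : List (List Char)) (sub : PvSub) =>
        let ls2 := ls2 ++ ["      ".toList ++ pvEscChars sub.1]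
        (PySem.List.slice sub.2 none (some 3)).foldl
          (fun ls3 pt => ls3 ++ ["        ".toList ++ pvEscChars pt]) ls2)
        = fun ls2 sub => ls2 ++ pvRenderSub sub := by
      funext ls2 sub
      simp only [h3, pvRenderSub, List.append_assoc, List.singleton_append]
    rw [this, PySem.List.foldl_append_eq_flatMap]
    rfl
  rw [PySem.List.slice_to secs (by norm_num)]
  have : (fun (ls : List (List Char)) (sec : PvSec) =>
      let ls := ls ++ ["    ".toList ++ pvEscChars sec.1]
      (PySem.List.slice sec.2 none (some 5)).foldl (fun ls2 sub =>
          let ls2 := ls2 ++ ["      ".toList ++ pvEscChars sub.1]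
          (PySem.List.slice sub.2 none (some 3)).foldl
            (fun ls3 pt => ls3 ++ ["        ".toList ++ pvEscChars pt]) ls2) ls)
      = fun ls sec => ls ++ pvRenderSec sec := by
    funext ls sec
    simp only [h2, pvRenderSec, List.append_assoc, List.singleton_append]
  rw [this, PySem.List.foldl_append_eq_flatMap]
  rfl

lemma pvTakeConcat {α : Type} (l : List α) (x : α) (n : Nat) :
    (l ++ [x]).take n = l.take n ++ (if l.length < n then [x] else []) := by
  rw [List.take_append]
  by_cases h : l.length < n
  · obtain ⟨k, hk⟩ : ∃ k, n - l.length = k + 1 := ⟨n - l.length - 1, by omega⟩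
    simp [h, hk]
  · simp [h, show n - l.length = 0 by omega]

lemma pvRenderBody_append_sec (secs : List PvSec) (t : List Char) :
    pvRenderBody (secs ++ [(t, [])]) =
      pvRenderBody secs ++
        (if ((secs.length : Int) + 1 ≤ 7) then [("    ".toList ++ pvEscChars t)] else []) := by
  unfold pvRenderBody
  rw [pvTakeConcat, List.flatMap_append]
  by_cases h : secs.length < 7
  · simp [h, pvRenderSec, show ((secs.length : Int) + 1 ≤ 7) from by omega]
  · simp [h, show ¬((secs.length : Int) + 1 ≤ 7) from by omega]

lemma pvRenderBody_append_child (init : List PvSec) (name : List Char) (ch : List PvSub) (t : List Char) :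
    pvRenderBody (init ++ [(name, ch ++ [(t, [])])]) =
      pvRenderBody (init ++ [(name, ch)]) ++
        (if ((init.length : Int) + 1 ≤ 7 ∧ (ch.length : Int) + 1 ≤ 5) then
          [("      ".toList ++ pvEscChars t)] else []) := by
  have hsec : pvRenderSec (name, ch ++ [(t, [])]) = pvRenderSec (name, ch) ++
      (if ch.length < 5 then [("      ".toList ++ pvEscChars t)] else []) := by
    unfold pvRenderSec
    rw [pvTakeConcat, List.flatMap_append]
    by_cases h : ch.length < 5 <;> simp [h, pvRenderSub]
  unfold pvRenderBody
  rw [pvTakeConcat, pvTakeConcat, List.flatMap_append, List.flatMap_append]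
  by_cases h : init.length < 7
  · by_cases h5 : ch.length < 5 <;>
      simp [h, h5, hsec, show ((init.length : Int) + 1 ≤ 7) from by omega]
  · simp [h, show ¬((init.length : Int) + 1 ≤ 7) from by omega]

lemma pvRenderBody_append_point (init : List PvSec) (name : List Char) (cinit : List PvSub)
    (cname : List Char) (pts : List (List Char)) (t : List Char) :
    pvRenderBody (init ++ [(name, cinit ++ [(cname, pts ++ [t])])]) =
      pvRenderBody (init ++ [(name, cinit ++ [(cname, pts)])]) ++
        (if ((init.length : Int) + 1 ≤ 7 ∧ (cinit.length : Int) + 1 ≤ 5 ∧ (pts.length : Int) + 1 ≤ 3) then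
          [("        ".toList ++ pvEscChars t)] else []) := by
  have hsub : pvRenderSub (cname, pts ++ [t]) = pvRenderSub (cname, pts) ++
      (if pts.length < 3 then [("        ".toList ++ pvEscChars t)] else []) := by
    unfold pvRenderSub
    rw [pvTakeConcat, List.map_append]
    by_cases h : pts.length < 3 <;> simp [h]
  have hsec : pvRenderSec (name, cinit ++ [(cname, pts ++ [t])]) =
      pvRenderSec (name, cinit ++ [(cname, pts)]) ++
      (if cinit.length < 5 ∧ pts.length < 3 then [("        ".toList ++ pvEscChars t)] else []) := by
    unfold pvRenderSec
    rw [pvTakeConcat, pvTakeConcat, List.flatMap_append, List.flatMap_append]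
    by_cases h5 : cinit.length < 5
    · by_cases h3 : pts.length < 3 <;> simp [h5, h3, hsub]
    · simp [h5]
  unfold pvRenderBody
  rw [pvTakeConcat, pvTakeConcat, List.flatMap_append, List.flatMap_append]
  by_cases h : init.length < 7
  · by_cases h5 : cinit.length < 5
    · by_cases h3 : pts.length < 3 <;>
        simp [h, h5, h3, hsec, show ((init.length : Int) + 1 ≤ 7) from by omega,
          show ((cinit.length : Int) + 1 ≤ 5) from by omega]
    · simp [h, hsec, h5, show ¬((cinit.length : Int) + 1 ≤ 5) from by omega]
  · simp [h, show ¬((init.length : Int) + 1 ≤ 7) from by omega]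

lemma pvChildC_concat (init : List PvSec) (s : PvSec) :
    pvChildC (init ++ [s]) = (s.2.length : Int) := by
  simp [pvChildC]

lemma pvPointC_concat_nil (init : List PvSec) (n : List Char) :
    pvPointC (init ++ [(n, ([] : List PvSub))]) = -1 := by
  simp [pvPointC]

lemma pvPointC_concat_concat (init : List PvSec) (n : List Char) (cinit : List PvSub) (sub : PvSub) :
    pvPointC (init ++ [(n, cinit ++ [sub])]) = (sub.2.length : Int) := by
  simp [pvPointC]

lemma pvChildC_nil : pvChildC [] = -1 := rfl

lemma pvPointC_nil : pvPointC [] = -1 := rfl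

lemma pvIfBody {α : Type} (c : Prop) [Decidable c] (body : List α) (x : α) :
    (if c then body ++ [x] else body) = body ++ (if c then [x] else []) := by
  split_ifs <;> simp

lemma pvStepSim (raw : List Char) (Atitle : List Char) (secs : List PvSec)
    (cur : Option (List Char)) (body : List (List Char)) :
    ∃ d, pvBLine (Atitle, cur, body, (secs.length : Int), pvChildC secs, pvPointC secs) raw
        = ((pvALine ((Atitle, secs), cur) raw).1.1, (pvALine ((Atitle, secs), cur) raw).2,
           body ++ d, (((pvALine ((Atitle, secs), cur) raw).1.2.length : Int)),
           pvChildC (pvALine ((Atitle, secs), cur) raw).1.2,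
           pvPointC (pvALine ((Atitle, secs), cur) raw).1.2)
      ∧ pvRenderBody (pvALine ((Atitle, secs), cur) raw).1.2 = pvRenderBody secs ++ d := by
  by_cases h1 : PySem.Chars.startswith (PySem.Chars.strip raw) "# ".toList = true
  · by_cases hf : pvFalsy cur = true
    · exact ⟨[], by simp only [pvBLine, pvALine, h1, if_true, hf, List.append_nil],
        by simp only [pvALine, h1, if_true, hf, List.append_nil]⟩
    · rw [Bool.not_eq_true] at hf
      refine ⟨if ((secs.length : Int) + 1 ≤ 7) then
          [("    ".toList ++ pvEscChars (PySem.Chars.strip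
            (PySem.Chars.slice (PySem.Chars.strip raw) (some 2) none)))] else [], ?_, ?_⟩
      · simp only [pvBLine, pvALine, h1, if_true, hf, Bool.false_eq_true, if_false,
          Prod.mk.injEq, List.length_append, List.length_cons, List.length_nil,
          pvChildC_concat, pvPointC_concat_nil,
          Nat.cast_add, Nat.cast_one, Nat.cast_zero, zero_add]
        and_intros <;> first | trivial | rfl | (push_cast; omega) | exact pvIfBody _ _ _
      · simp only [pvALine, h1, if_true, hf, Bool.false_eq_true, if_false]
        exact pvRenderBody_append_sec secs _
  · by_cases h2 : PySem.Chars.startswith (PySem.Chars.strip raw) "## ".toList = true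
    · refine ⟨if ((secs.length : Int) + 1 ≤ 7) then
          [("    ".toList ++ pvEscChars (PySem.Chars.strip
            (PySem.Chars.slice (PySem.Chars.strip raw) (some 3) none)))] else [], ?_, ?_⟩
      · simp only [pvBLine, pvALine, h1, h2, if_true, Bool.false_eq_true, if_false,
          Prod.mk.injEq, List.length_append, List.length_cons, List.length_nil,
          pvChildC_concat, pvPointC_concat_nil,
          Nat.cast_add, Nat.cast_one, Nat.cast_zero, zero_add]
        and_intros <;> first | trivial | rfl | (push_cast; omega) | exact pvIfBody _ _ _
      · simp only [pvALine, h1, h2, if_true, Bool.false_eq_true, if_false]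
        exact pvRenderBody_append_sec secs _
    · by_cases h3 : PySem.Chars.startswith (PySem.Chars.strip raw) "### ".toList = true
      · rcases List.eq_nil_or_concat secs with rfl | ⟨init, ⟨n, ch⟩, rfl⟩
        · refine ⟨[], ?_, by
            simp only [pvALine, h1, h2, h3, Bool.false_eq_true, if_false, if_true,
              List.getLast?_nil, List.append_nil]⟩
          simp only [pvBLine, pvALine, h1, h2, h3, if_true, Bool.false_eq_true, if_false,
            List.append_nil, List.getLast?_nil, pvChildC_nil, pvPointC_nil,
            if_neg (show ¬((0:Int) ≤ -1) by decide)]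
        · simp only [List.concat_eq_append]
          refine ⟨if (((init.length : Int) + 1 ≤ 7) ∧ ((ch.length : Int) + 1 ≤ 5)) then
              [("      ".toList ++ pvEscChars (PySem.Chars.strip
                (PySem.Chars.slice (PySem.Chars.strip raw) (some 4) none)))] else [], ?_, ?_⟩
          · simp only [pvBLine, pvALine, h1, h2, h3, if_true, Bool.false_eq_true, if_false,
              Prod.mk.injEq, List.length_append, List.length_cons, List.length_nil,
              pvChildC_concat, pvPointC_concat_concat,
              List.getLast?_concat, List.dropLast_concat,
              Nat.cast_add, Nat.cast_one, Nat.cast_zero, zero_add,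
              if_pos (Int.natCast_nonneg ch.length)]
            and_intros <;> first | trivial | rfl | (push_cast; omega) | exact pvIfBody _ _ _
          · simp only [pvALine, h1, h2, h3, if_true, Bool.false_eq_true, if_false,
              List.getLast?_concat, List.dropLast_concat]
            exact pvRenderBody_append_child init n ch _
      · by_cases h4 : PySem.Chars.startswith (PySem.Chars.strip raw) "#### ".toList = true
        · rcases List.eq_nil_or_concat secs with rfl | ⟨init, ⟨n, ch⟩, rfl⟩
          · refine ⟨[], ?_, by
              simp only [pvALine, h1, h2, h3, h4, Bool.false_eq_true, if_false, if_true,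
                List.getLast?_nil, List.append_nil]⟩
            simp only [pvBLine, pvALine, h1, h2, h3, h4, if_true, Bool.false_eq_true, if_false,
              List.append_nil, List.getLast?_nil, pvChildC_nil, pvPointC_nil,
              if_neg (show ¬((0:Int) ≤ -1) by decide)]
          · simp only [List.concat_eq_append]
            rcases List.eq_nil_or_concat ch with rfl | ⟨cinit, ⟨cn, pts⟩, rfl⟩
            · refine ⟨[], ?_, by
                simp only [pvALine, h1, h2, h3, h4, if_true, Bool.false_eq_true, if_false,
                  List.getLast?_nil, List.getLast?_concat, List.append_nil]⟩
              simp only [pvBLine, pvALine, h1, h2, h3, h4, if_true, Bool.false_eq_true, if_false,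
                List.getLast?_nil, List.getLast?_concat, List.append_nil,
                pvPointC_concat_nil, if_neg (show ¬((0:Int) ≤ -1) by decide)]
            · simp only [List.concat_eq_append]
              refine ⟨if (((init.length : Int) + 1 ≤ 7) ∧ ((cinit.length : Int) + 1 ≤ 5) ∧
                  ((pts.length : Int) + 1 ≤ 3)) then
                  [("        ".toList ++ pvEscChars (PySem.Chars.strip
                    (PySem.Chars.slice (PySem.Chars.strip raw) (some 5) none)))] else [], ?_, ?_⟩
              · simp only [pvBLine, pvALine, h1, h2, h3, h4, if_true, Bool.false_eq_true, if_false,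
                  Prod.mk.injEq, List.length_append, List.length_cons, List.length_nil,
                  pvChildC_concat, pvPointC_concat_concat,
                  List.getLast?_concat, List.dropLast_concat,
                  Nat.cast_add, Nat.cast_one,
                  if_pos (Int.natCast_nonneg pts.length)]
                and_intros <;> first | trivial | rfl | (push_cast; omega) | exact pvIfBody _ _ _
              · simp only [pvALine, h1, h2, h3, h4, if_true, Bool.false_eq_true, if_false,
                  List.getLast?_concat, List.dropLast_concat]
                exact pvRenderBody_append_point init n cinit cn pts _
        · exact ⟨[], by
            simp only [pvBLine, pvALine, h1, h2, h3, h4, Bool.false_eq_true, if_false,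
              List.append_nil], by
            simp only [pvALine, h1, h2, h3, h4, Bool.false_eq_true, if_false, List.append_nil]⟩

lemma pvFoldSim (lines : List (List Char)) : ∀ (Atitle : List Char) (secs : List PvSec)
    (cur : Option (List Char)) (body : List (List Char)),
    ∃ d, (lines.foldl pvBLine (Atitle, cur, body, (secs.length : Int), pvChildC secs, pvPointC secs))
        = (((lines.foldl pvALine ((Atitle, secs), cur)).1.1),
           (lines.foldl pvALine ((Atitle, secs), cur)).2,
           body ++ d, (((lines.foldl pvALine ((Atitle, secs), cur)).1.2.length : Int)),
           pvChildC (lines.foldl pvALine ((Atitle, secs), cur)).1.2,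
           pvPointC (lines.foldl pvALine ((Atitle, secs), cur)).1.2)
      ∧ pvRenderBody (lines.foldl pvALine ((Atitle, secs), cur)).1.2 = pvRenderBody secs ++ d := by
  induction lines with
  | nil => intro Atitle secs cur body; exact ⟨[], by simp, by simp⟩
  | cons raw rest ih =>
    intro Atitle secs cur body
    obtain ⟨d1, h1, r1⟩ := pvStepSim raw Atitle secs cur body
    obtain ⟨d2, h2, r2⟩ := ih (pvALine ((Atitle, secs), cur) raw).1.1
      (pvALine ((Atitle, secs), cur) raw).1.2 (pvALine ((Atitle, secs), cur) raw).2 (body ++ d1)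
    simp only [Prod.mk.eta] at h2 r2
    refine ⟨d1 ++ d2, ?_, ?_⟩
    · rw [List.foldl_cons, List.foldl_cons, h1]
      simpa [List.append_assoc] using h2
    · rw [List.foldl_cons, r2, r1, List.append_assoc]

-- ===== VERDICT (by name: the statement is the Claim_ definition above) =====
theorem generate_mindmap_code_spec : Claim_equal_generate_mindmap_code := by
  intro markdown _
  unfold Spec_generate_mindmap_code generate_mindmap_code generate_mindmap_code_alt pvExtract
  obtain ⟨d, hB, hR⟩ := pvFoldSim (PySem.Chars.splitOn markdown.toList ['\n'])
    "Research Report".toList [] none []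
  simp only [pvChildC, pvPointC, pvRenderBody, List.length_nil, Nat.cast_zero, List.getLast?_nil,
    List.take_nil, List.flatMap_nil, List.nil_append] at hB hR
  simp only [pvAFormat, hB]
  simp only [pvRenderBody, hR, List.cons_append, List.nil_append]
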